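-- pv_equiv track=rewrite | github.com/willmiao/ComfyUI-Lora-Manager | scripts/test_i18n.py | find_closing_quote
-- ===== SOURCE A (Python) =====
-- def find_closing_quote(text: str, start: int) -> int:
--     """
--     Find the position of the closing quote, handling escaped quotes properly.
--     """
--     i = start
--     while i < len(text):
--         if text[i] == '"':
--             # Count preceding backslashes
--             backslash_count = 0
--             j = i - 1
--             while j >= 0 and text[j] == '\\':
--                 backslash_count += 1
--                 j -= 1
--
--             # If even number of backslashes (including 0), the quote is not escaped
--             if backslash_count % 2 == 0:
--                 return i
--         i += 1
--     return -1
-- ===== SOURCE B (Python) =====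
-- def find_closing_quote(text: str, start: int) -> int:
--     run = 0  # length of the backslash run ending just before the current position
--     for i, ch in enumerate(text):
--         if ch == '"' and i >= start and run % 2 == 0:
--             return i
--         run = run + 1 if ch == '\\' else 0
--     return -1
-- ===== Notes on version B (the rewrite author's own statement) =====
-- stated objective: simpler
-- what changed: Replaces the backward backslash-counting inner loop with a single forward pass that maintains the current backslash-run length as state, so quotes are tested against an already-known parity.
-- outside the precondition, e.g. on find_closing_quote('"', -1): A returns -1, B returns 0; on find_closing_quote('a', -5): A raises IndexError, B returns -1
import Mathlib
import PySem

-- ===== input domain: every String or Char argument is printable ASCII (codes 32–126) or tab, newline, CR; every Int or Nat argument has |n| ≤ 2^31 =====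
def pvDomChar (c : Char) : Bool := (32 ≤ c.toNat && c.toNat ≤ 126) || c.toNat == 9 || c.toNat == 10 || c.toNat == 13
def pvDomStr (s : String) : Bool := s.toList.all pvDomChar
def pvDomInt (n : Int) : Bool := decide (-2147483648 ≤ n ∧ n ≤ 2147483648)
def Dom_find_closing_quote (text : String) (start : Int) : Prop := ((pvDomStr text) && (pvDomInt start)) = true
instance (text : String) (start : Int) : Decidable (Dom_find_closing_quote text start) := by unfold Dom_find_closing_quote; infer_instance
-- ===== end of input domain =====

-- B replaces A's backward backslash-counting inner loop by a single forward pass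
-- carrying the backslash-run length as state (simpler; return value equivalence proved for 0 ≤ start).

-- ===== PORT A =====
-- inner while loop: 'while j >= 0 and text[j] == '\\': backslash_count += 1; j -= 1'
def fcqA_countBack (cs : List Char) (j : Int) (acc : Int) : Int :=
  if h : 0 ≤ j ∧ PySem.List.pyGet? cs j = some '\\' then
    fcqA_countBack cs (j - 1) (acc + 1)
  else acc
termination_by (j + 1).toNat
decreasing_by omega

-- outer while loop: 'while i < len(text): …; i += 1'
-- (where Python would raise IndexError — i < -len — pyGet? is none and the loop just advances;
--  those inputs are excluded by Pre_ below)
def fcqA_loop (cs : List Char) (i : Int) : Int :=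
  if h : i < (cs.length : Int) then
    if PySem.List.pyGet? cs i = some '"' then
      if PySem.Int.mod (fcqA_countBack cs (i - 1) 0) 2 = 0 then i
      else fcqA_loop cs (i + 1)
    else fcqA_loop cs (i + 1)
  else -1
termination_by ((cs.length : Int) - i).toNat
decreasing_by all_goals omega

def find_closing_quote (text : String) (start : Int) : Int :=
  fcqA_loop text.toList start

-- ===== PORT B =====
-- 'for i, ch in enumerate(text)' carrying the backslash-run length 'run'
def fcqB_go (start : Int) (i : Int) (run : Int) : List Char → Int
  | [] => -1
  | c :: rest =>
      if c = '"' ∧ start ≤ i ∧ PySem.Int.mod run 2 = 0 then i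
      else fcqB_go start (i + 1) (if c = '\\' then run + 1 else 0) rest

def find_closing_quote_alt (text : String) (start : Int) : Int :=
  fcqB_go start 0 0 text.toList

-- ===== PRECONDITION & SPEC =====
-- Pre_ restricts to the natural domain 0 ≤ start: on negative start A raises IndexError
-- (start < -len(text), text nonempty) or returns a value produced by Python's negative-index
-- wraparound, a corner outside the function's intended use (its callers pass quote positions ≥ 0).
def Pre_find_closing_quote (text : String) (start : Int) : Prop := 0 ≤ start
instance (text : String) (start : Int) : Decidable (Pre_find_closing_quote text start) := by
  unfold Pre_find_closing_quote; infer_instance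

def pvWitness_find_closing_quote : String × Int := ("he said \\\"hi\\\" ok\"", 1)

def Spec_find_closing_quote (text : String) (start : Int) (out : Int) : Prop :=
  out = find_closing_quote_alt text start
instance (text : String) (start : Int) (out : Int) : Decidable (Spec_find_closing_quote text start out) := by
  unfold Spec_find_closing_quote; infer_instance

-- ===== CLAIM (what is proved, stated in full; the proofs are below) =====
def Claim_equal_find_closing_quote : Prop := ∀ (text : String) (start : Int), Dom_find_closing_quote text start → Pre_find_closing_quote text start → Spec_find_closing_quote text start (find_closing_quote text start)

-- ===== LEMMAS AND PROOFS =====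

-- run length of the backslash run of cs ending just before position i
def runAt (cs : List Char) : Nat → Int
  | 0 => 0
  | i + 1 => if cs[i]? = some '\\' then runAt cs i + 1 else 0

theorem countBack_eq_runAt (cs : List Char) (i : Nat) (acc : Int) :
    fcqA_countBack cs ((i : Int) - 1) acc = acc + runAt cs i := by
  induction i generalizing acc with
  | zero =>
      rw [fcqA_countBack]
      simp [runAt]
  | succ n ih =>
      rw [fcqA_countBack]
      by_cases h : cs[n]? = some '\\'
      · have hg : PySem.List.pyGet? cs ((n : Int) + 1 - 1) = some '\\' := by
          simpa [PySem.List.pyGet?_natCast] using h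
        simp only [Nat.cast_succ]
        rw [dif_pos ⟨by omega, by simpa using hg⟩]
        have : ((n : Int) + 1 - 1 - 1) = (n : Int) - 1 := by ring
        rw [this, ih]
        simp [runAt, h]; ring
      · have hg : ¬ (0 ≤ (n : Int) + 1 - 1 ∧ PySem.List.pyGet? cs ((n : Int) + 1 - 1) = some '\\') := by
          intro ⟨_, hc⟩
          exact h (by simpa [PySem.List.pyGet?_natCast] using hc)
        simp only [Nat.cast_succ]
        rw [dif_neg (by simpa using hg)]
        simp [runAt, h]

-- tail phase: from a position i ≥ start the two loops agree
theorem tail_phase (cs : List Char) (start : Int) (i : Nat) (hs : start ≤ (i : Int)) :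
    fcqB_go start (i : Int) (runAt cs i) (cs.drop i) = fcqA_loop cs (i : Int) := by
  by_cases hlen : i < cs.length
  · rw [List.drop_eq_getElem_cons hlen, fcqB_go, fcqA_loop, dif_pos (by exact_mod_cast hlen)]
    have hget : PySem.List.pyGet? cs (i : Int) = some cs[i] := by
      simp [PySem.List.pyGet?_natCast, List.getElem?_eq_getElem hlen]
    have hcount : fcqA_countBack cs ((i : Int) - 1) 0 = runAt cs i := by
      simpa using countBack_eq_runAt cs i 0
    have hrun : (if cs[i] = '\\' then runAt cs i + 1 else 0) = runAt cs (i + 1) := by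
      simp [runAt, List.getElem?_eq_getElem hlen]
    have hrec : fcqB_go start ((i : Int) + 1) (runAt cs (i + 1)) (cs.drop (i + 1)) =
        fcqA_loop cs ((i : Int) + 1) := by
      have := tail_phase cs start (i + 1) (by push_cast; omega)
      push_cast at this
      exact this
    rw [hget, hcount, hrun]
    by_cases hq : cs[i] = '"'
    · rw [hq]
      by_cases hpar : PySem.Int.mod (runAt cs i) 2 = 0
      · rw [if_pos ⟨rfl, hs, hpar⟩, if_pos rfl, if_pos hpar]
      · rw [if_neg (by rintro ⟨_, _, h⟩; exact hpar h), if_pos rfl, if_neg hpar]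
        exact hrec
    · rw [if_neg (by rintro ⟨h, _⟩; exact hq h), if_neg (by simp [hq])]
      exact hrec
  · rw [List.drop_eq_nil_of_le (by omega), fcqB_go, fcqA_loop,
      dif_neg (by exact_mod_cast hlen)]
termination_by cs.length - i

-- head phase: B skips positions below start, updating only the run state
theorem head_phase (cs : List Char) (start : Int) (i : Nat) (hs : (i : Int) ≤ start) :
    fcqB_go start (i : Int) (runAt cs i) (cs.drop i) = fcqA_loop cs start := by
  by_cases heq : (i : Int) = start
  · rw [← heq]
    exact tail_phase cs (i : Int) i le_rfl
  · have hlt : (i : Int) < start := lt_of_le_of_ne hs heq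
    by_cases hlen : i < cs.length
    · rw [List.drop_eq_getElem_cons hlen, fcqB_go,
        if_neg (by rintro ⟨_, h, _⟩; omega)]
      have hrun : (if cs[i] = '\\' then runAt cs i + 1 else 0) = runAt cs (i + 1) := by
        simp [runAt, List.getElem?_eq_getElem hlen]
      rw [hrun]
      have := head_phase cs start (i + 1) (by push_cast; omega)
      push_cast at this
      exact this
    · rw [List.drop_eq_nil_of_le (by omega), fcqB_go, fcqA_loop,
        dif_neg (by omega)]
termination_by cs.length - i

-- ===== VERDICT (by name: the statement is the Claim_ definition above) =====
theorem find_closing_quote_spec : Claim_equal_find_closing_quote := by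
  intro text start _ hpre
  unfold Spec_find_closing_quote find_closing_quote find_closing_quote_alt
  have h := head_phase text.toList start 0 (by exact_mod_cast hpre)
  simpa [runAt] using h.symm
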